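-- pv_equiv track=rewrite | github.com/SteveFurnival/PVTfree | utilities.py | procFileName
-- ===== SOURCE A (Python) =====
-- def procFileName(filN) :
--
--     sPlt = filN.split("\\")     #-- Split File/Dir-Name by '\'
--     nSpl = len(sPlt)
--
--     path = ""
--     for iSpl in range(nSpl-1) :
--         path = path + sPlt[iSpl] + "\\"     #-- Drive & Sub-Directories
--
--     rooX = sPlt[nSpl-1]         #-- Rootname and Extension
--     sPlt = rooX.split(".")
--     root = sPlt[0]
--
-- #== Return path and root-name =========================================
--
--     return path,root
-- ===== SOURCE B (Python) =====
-- def procFileName(filN):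
--     head, sep, tail = filN.rpartition("\\")
--     return head + sep, tail.split(".")[0]
-- ===== Notes on version B (the rewrite author's own statement) =====
-- stated objective: idiomatic
-- what changed: Replaces split-on-every-backslash plus an index loop that rejoins all leading segments with a single rpartition at the last backslash: head+sep is the path and the part of the tail before the first dot is the root.
import Mathlib
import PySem

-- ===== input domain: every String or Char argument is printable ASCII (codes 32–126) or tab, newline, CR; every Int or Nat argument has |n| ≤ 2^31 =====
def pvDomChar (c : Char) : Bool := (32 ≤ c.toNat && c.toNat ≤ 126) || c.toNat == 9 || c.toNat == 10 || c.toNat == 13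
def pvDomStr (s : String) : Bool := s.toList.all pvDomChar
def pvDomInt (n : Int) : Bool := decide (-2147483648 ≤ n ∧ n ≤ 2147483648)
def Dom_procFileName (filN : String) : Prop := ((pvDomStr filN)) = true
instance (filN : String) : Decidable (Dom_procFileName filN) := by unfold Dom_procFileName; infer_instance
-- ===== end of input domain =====

-- B replaces A's split-all-segments-and-rejoin loop by a single rpartition at the last backslash (idiomatic, same cost).

-- ===== PORT A =====
def procFileName (filN : String) : String × String :=
  let sPlt := PySem.Chars.splitOn filN.toList ['\\']
  let nSpl : Int := sPlt.length
  let path := (PySem.List.pyRange 0 (nSpl - 1) 1).foldl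
      (fun path iSpl => path ++ PySem.List.pyGetD sPlt iSpl [] ++ ['\\']) []
  let rooX := PySem.List.pyGetD sPlt (nSpl - 1) []
  let root := PySem.List.pyGetD (PySem.Chars.splitOn rooX ['.']) 0 []
  (String.ofList path, String.ofList root)

-- ===== PORT B =====
-- rpartition("\\") = cut after the highest index of '\\' (whole string becomes the tail when absent)
def procFileName_alt (filN : String) : String × String :=
  let cs := filN.toList
  let i := PySem.Chars.rfind cs ['\\']
  let cut := if i = -1 then 0 else i.toNat + 1
  let root := PySem.List.pyGetD (PySem.Chars.splitOn (cs.drop cut) ['.']) 0 []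
  (String.ofList (cs.take cut), String.ofList root)

-- ===== PRECONDITION & SPEC =====
def Spec_procFileName (filN : String) (out : String × String) : Prop := out = procFileName_alt filN
instance (filN : String) (out : String × String) : Decidable (Spec_procFileName filN out) := by unfold Spec_procFileName; infer_instance

-- ===== CLAIM (what is proved, stated in full; the proofs are below) =====
def Claim_equal_procFileName : Prop := ∀ (filN : String), Dom_procFileName filN → Spec_procFileName filN (procFileName filN)

-- ===== LEMMAS AND PROOFS =====

/-- Proof-side characterisation of splitting on a single character. -/
def split1 (c : Char) : List Char → List (List Char)
  | [] => [[]]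
  | x :: xs => if x = c then [] :: split1 c xs else (split1 c xs).modifyHead (x :: ·)

lemma split1_ne_nil (c : Char) (l : List Char) : split1 c l ≠ [] := by
  cases l with
  | nil => simp [split1]
  | cons x xs =>
    simp only [split1]
    split
    · simp
    · intro h
      have := congrArg List.length h
      simp at this
      exact split1_ne_nil c xs this

lemma singleton_isPrefixOf (c : Char) (l : List Char) :
    [c].isPrefixOf l = true ↔ l.head? = some c := by
  cases l with
  | nil => simp [List.isPrefixOf]
  | cons y t =>
    simp only [List.isPrefixOf, List.head?_cons, Option.some.injEq, Bool.and_eq_true,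
      beq_iff_eq, and_true]
    exact eq_comm

lemma splitOn_go_spec (c : Char) : ∀ (fuel : Nat) (l cur : List Char) (acc : List (List Char)),
    l.length < fuel →
    PySem.Chars.splitOn.go [c] fuel l cur acc
      = acc.reverse ++ (split1 c l).modifyHead (cur.reverse ++ ·) := by
  intro fuel
  induction fuel with
  | zero => intro l cur acc h; omega
  | succ n ih =>
    intro l cur acc h
    cases l with
    | nil =>
      rw [PySem.Chars.splitOn.go]
      · simp [split1]
      · omega
    | cons x rest =>
      rw [PySem.Chars.splitOn.go]
      by_cases hx : x = c
      · have hp : [c].isPrefixOf (x :: rest) = true := by simp [List.isPrefixOf, hx]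
        rw [if_pos hp]
        simp only [List.length_singleton, List.drop_succ_cons, List.drop_zero]
        rw [ih rest [] _ (by simp at h ⊢; omega)]
        obtain ⟨hd, tl, he⟩ : ∃ hd tl, split1 c rest = hd :: tl := by
          cases hh : split1 c rest with
          | nil => exact absurd hh (split1_ne_nil c rest)
          | cons hd tl => exact ⟨hd, tl, rfl⟩
        simp [split1, hx, he]
      · have hp : [c].isPrefixOf (x :: rest) = false := by
          simp [List.isPrefixOf]; exact fun hh => hx hh.symm
        rw [if_neg (by simp [hp])]
        rw [ih rest (x :: cur) acc (by simp at h ⊢; omega)]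
        obtain ⟨hd, tl, he⟩ : ∃ hd tl, split1 c rest = hd :: tl := by
          cases hh : split1 c rest with
          | nil => exact absurd hh (split1_ne_nil c rest)
          | cons hd tl => exact ⟨hd, tl, rfl⟩
        simp [split1, hx, he]

lemma splitOn_eq_split1 (c : Char) (cs : List Char) :
    PySem.Chars.splitOn cs [c] = split1 c cs := by
  show PySem.Chars.splitOn.go [c] (cs.length + 1) cs [] [] = _
  rw [splitOn_go_spec c (cs.length + 1) cs [] [] (by omega)]
  obtain ⟨hd, tl, he⟩ : ∃ hd tl, split1 c cs = hd :: tl := by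
    cases hh : split1 c cs with
    | nil => exact absurd hh (split1_ne_nil c cs)
    | cons hd tl => exact ⟨hd, tl, rfl⟩
  simp [he]

lemma split1_no_sep (c : Char) (l : List Char) (h : c ∉ l) : split1 c l = [l] := by
  induction l with
  | nil => rfl
  | cons x xs ih =>
    simp at h
    have hx : ¬ x = c := fun hh => h.1 hh.symm
    simp [split1, hx, ih h.2]

lemma split1_append (c : Char) (a b : List Char) (hb : c ∉ b) :
    split1 c (a ++ c :: b) = split1 c a ++ [b] := by
  induction a with
  | nil => simp [split1, split1_no_sep c b hb]
  | cons x a' ih =>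
    by_cases hx : x = c
    · simp [split1, hx, ih]
    · obtain ⟨hd, tl, he⟩ : ∃ hd tl, split1 c a' = hd :: tl := by
        cases hh : split1 c a' with
        | nil => exact absurd hh (split1_ne_nil c a')
        | cons hd tl => exact ⟨hd, tl, rfl⟩
      simp [split1, hx, ih, he]

lemma flatten_split1 (c : Char) (a : List Char) :
    ((split1 c a).map (· ++ [c])).flatten = a ++ [c] := by
  induction a with
  | nil => simp [split1]
  | cons x xs ih =>
    by_cases hx : x = c
    · simp [split1, hx, ih]
    · obtain ⟨hd, tl, he⟩ : ∃ hd tl, split1 c xs = hd :: tl := by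
        cases hh : split1 c xs with
        | nil => exact absurd hh (split1_ne_nil c xs)
        | cons hd tl => exact ⟨hd, tl, rfl⟩
      simp only [split1, if_neg hx, he] at ih ⊢
      simp at ih ⊢
      simp [ih]

lemma rfind_go_not (c : Char) (s : List Char) (h : c ∉ s) :
    ∀ j, PySem.Chars.rfind.go s [c] j = -1 := by
  intro j
  induction j with
  | zero =>
    rw [PySem.Chars.rfind.go]
    rw [if_neg]
    intro hp
    rw [singleton_isPrefixOf] at hp
    exact h (List.mem_of_mem_head? (Option.mem_def.mpr hp))
  | succ n ih =>
    rw [PySem.Chars.rfind.go]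
    rw [if_neg, ih]
    intro hp
    rw [singleton_isPrefixOf] at hp
    exact h (List.mem_of_mem_drop (List.mem_of_mem_head? (Option.mem_def.mpr hp)))

lemma rfind_go_found (c : Char) (a b : List Char) (hb : c ∉ b) :
    ∀ j, a.length ≤ j → PySem.Chars.rfind.go (a ++ c :: b) [c] j = a.length := by
  intro j
  induction j with
  | zero =>
    intro hj
    have ha : a = [] := by
      cases a with
      | nil => rfl
      | cons _ _ => simp at hj
    subst ha
    rw [PySem.Chars.rfind.go]
    simp [List.isPrefixOf]
  | succ n ih =>
    intro hj
    rw [PySem.Chars.rfind.go]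
    by_cases he : a.length = n + 1
    · rw [if_pos]
      · omega
      · rw [singleton_isPrefixOf, List.head?_drop]
        rw [← he, List.getElem?_append_right (le_refl _)]
        simp
    · have hle : a.length ≤ n := by omega
      rw [if_neg, ih hle]
      rw [singleton_isPrefixOf, List.head?_drop]
      rw [List.getElem?_append_right (by omega)]
      intro hp
      rcases Nat.exists_eq_add_of_lt (show a.length < n + 1 by omega) with ⟨k, hk⟩
      have : n + 1 - a.length = k + 1 := by omega
      rw [this] at hp
      simp at hp
      exact hb (List.mem_of_getElem? hp)

lemma rfind_not (c : Char) (s : List Char) (h : c ∉ s) :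
    PySem.Chars.rfind s [c] = -1 := by
  show PySem.Chars.rfind.go s [c] s.length = -1
  exact rfind_go_not c s h _

lemma rfind_found (c : Char) (a b : List Char) (hb : c ∉ b) :
    PySem.Chars.rfind (a ++ c :: b) [c] = (a.length : Int) := by
  show PySem.Chars.rfind.go (a ++ c :: b) [c] (a ++ c :: b).length = _
  exact rfind_go_found c a b hb _ (by simp)

lemma exists_last_split (c : Char) (cs : List Char) (h : c ∈ cs) :
    ∃ a b, cs = a ++ c :: b ∧ c ∉ b := by
  induction cs with
  | nil => simp at h
  | cons x xs ih =>
    by_cases hm : c ∈ xs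
    · obtain ⟨a, b, he, hb⟩ := ih hm
      exact ⟨x :: a, b, by simp [he], hb⟩
    · have hx : x = c := by
        rcases List.mem_cons.mp h with h1 | h2
        · exact h1.symm
        · exact absurd h2 hm
      exact ⟨[], xs, by simp [hx], hm⟩

lemma foldl_range_getD (c : Char) (d : List Char) :
    ∀ (xs ys : List (List Char)), xs <+: ys →
    (List.range xs.length).foldl (fun acc k => acc ++ ys.getD k d ++ [c]) []
      = (xs.map (· ++ [c])).flatten := by
  intro xs
  induction xs using List.reverseRecOn with
  | nil => intro ys _; simp
  | append_singleton xs x ih =>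
    intro ys hpre
    obtain ⟨t, ht⟩ := hpre
    subst ht
    rw [List.length_append, List.length_singleton, List.range_succ, List.foldl_append]
    rw [ih ((xs ++ [x]) ++ t) ⟨[x] ++ t, by simp⟩]
    simp

lemma main_eq (filN : String) : procFileName filN = procFileName_alt filN := by
  unfold procFileName procFileName_alt
  simp only [splitOn_eq_split1]
  by_cases hc : '\\' ∈ filN.toList
  · obtain ⟨a, b, he, hb⟩ := exists_last_split '\\' filN.toList hc
    rw [he]
    rw [rfind_found '\\' a b hb, split1_append '\\' a b hb]
    have hne : (a.length : Int) ≠ -1 := by omega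
    rw [if_neg hne]
    have hcut : ((a.length : Int)).toNat + 1 = a.length + 1 := by omega
    rw [hcut]
    have hlen : ((split1 '\\' a ++ [b]).length : Int) - 1 = ((split1 '\\' a).length : Nat) := by
      simp
    rw [hlen]
    have htk : (a ++ '\\' :: b).take (a.length + 1) = a ++ ['\\'] := by
      have : a ++ '\\' :: b = (a ++ ['\\']) ++ b := by simp
      rw [this, List.take_append_of_le_length (by simp), List.take_of_length_le (by simp)]
    have hdp : (a ++ '\\' :: b).drop (a.length + 1) = b := by
      have : a ++ '\\' :: b = (a ++ ['\\']) ++ b := by simp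
      rw [this]
      have h1 : a.length + 1 = (a ++ ['\\']).length := by simp
      rw [h1, List.drop_left]
    rw [htk, hdp]
    have hroo : PySem.List.pyGetD (split1 '\\' a ++ [b]) ((split1 '\\' a).length : Nat) [] = b := by
      rw [PySem.List.pyGetD_natCast]
      rw [List.getD_eq_getElem?_getD, List.getElem?_append_right (le_refl _)]
      simp
    rw [hroo]
    have hpath : (PySem.List.pyRange 0 ((split1 '\\' a).length : Nat) 1).foldl
        (fun path iSpl => path ++ PySem.List.pyGetD (split1 '\\' a ++ [b]) iSpl [] ++ ['\\']) []
        = a ++ ['\\'] := by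
      rw [PySem.List.pyRange_zero_natCast, List.foldl_map]
      simp only [PySem.List.pyGetD_natCast]
      rw [foldl_range_getD '\\' [] (split1 '\\' a) (split1 '\\' a ++ [b]) (List.prefix_append _ _)]
      exact flatten_split1 '\\' a
    rw [hpath]
  · rw [rfind_not '\\' filN.toList hc, if_pos rfl]
    rw [split1_no_sep '\\' filN.toList hc]
    have h0 : ((([filN.toList] : List (List Char)).length : Int)) - 1 = 0 := by simp
    rw [h0]
    have hr : PySem.List.pyRange 0 0 1 = [] := rfl
    rw [hr]
    have hg : PySem.List.pyGetD [filN.toList] (0 : Int) [] = filN.toList := rfl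
    rw [hg]
    simp

-- ===== VERDICT (by name: the statement is the Claim_ definition above) =====
theorem procFileName_spec : Claim_equal_procFileName := by
  intro filN _
  show procFileName filN = procFileName_alt filN
  exact main_eq filN
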